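-- pv_equiv track=rewrite | github.com/danielvw/ComfyUI-MotionCapture | lib/mhr_skeleton.py | get_bvh_joint_order
-- ===== SOURCE A (Python) =====
-- from typing import Dict, List, Tuple, Optional
--
-- def get_bvh_joint_order(parent_indices: List[int]) -> List[int]:
--     """
--     Get depth-first traversal order of joints for BVH format.
--     BVH requires motion data in hierarchy order.
--
--     Args:
--         parent_indices: List of parent indices for each joint
--
--     Returns:
--         List of joint indices in depth-first order
--     """
--     joint_order = []
--
--     def traverse(joint_idx: int):
--         joint_order.append(joint_idx)
--         children = [i for i, parent in enumerate(parent_indices) if parent == joint_idx]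
--         for child_idx in children:
--             traverse(child_idx)
--
--     traverse(0)  # Start from root
--     return joint_order
-- ===== SOURCE B (Python) =====
-- def get_bvh_joint_order(parent_indices):
--     # Different algorithm: preorder of the hierarchy equals the lexicographic
--     # order of the root-to-node index paths, so compute each joint's root path
--     # by walking its parent chain and sort the reachable joints by that path.
--     n = len(parent_indices)
--     keyed = []
--     for i in range(n):
--         path = [i]
--         j = i
--         steps = 0
--         while j != 0 and 0 <= j < n and steps < n:
--             j = parent_indices[j]
--             path.append(j)
--             steps += 1
--         if j == 0:
--             path.reverse()
--             keyed.append((path, i))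
--     keyed.sort(key=lambda e: e[0])
--     return [i for _, i in keyed]
-- ===== Notes on version B (the rewrite author's own statement) =====
-- stated objective: alternative
-- what changed: B replaces the recursive DFS (which rescans the whole parent list at every visited joint) by a non-recursive algorithm: it computes each joint's root-to-joint index path by walking the parent chain upward and sorts the reachable joints lexicographically by that path, which equals the preorder.
-- intended difference: On the empty list A returns [0], an index of a joint that does not exist; B returns [], the intended order for a skeleton with no joints. — e.g. on get_bvh_joint_order([]): A returns [0], B returns []
import Mathlib
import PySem

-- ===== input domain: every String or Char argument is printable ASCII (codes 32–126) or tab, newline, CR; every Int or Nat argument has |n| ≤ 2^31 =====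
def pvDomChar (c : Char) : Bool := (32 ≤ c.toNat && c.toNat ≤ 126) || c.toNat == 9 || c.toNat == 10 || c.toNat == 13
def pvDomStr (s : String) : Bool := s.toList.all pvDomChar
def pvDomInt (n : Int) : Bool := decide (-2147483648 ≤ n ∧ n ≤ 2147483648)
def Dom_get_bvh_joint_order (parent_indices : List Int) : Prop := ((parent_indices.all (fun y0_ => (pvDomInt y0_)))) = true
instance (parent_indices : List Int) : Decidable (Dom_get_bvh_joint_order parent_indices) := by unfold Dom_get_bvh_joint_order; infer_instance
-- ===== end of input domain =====

-- B replaces A's recursive DFS by a different algorithm: each joint's root path is computed by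
-- walking its parent chain and the reachable joints are sorted lexicographically by that path
-- (preorder = lex order of root paths); on the empty list B returns [] where A returns [0] (D_ below).


-- ===== PORT A =====
-- traverse(joint_idx): append joint_idx, scan parent_indices for children, recurse.
-- The fuel (length+1) is a totality guard only: on every input admitted by
-- Pre_get_bvh_joint_order the recursion depth stays below it (a deeper child-path
-- from 0 would revisit a node, giving a parent-chain cycle through 0).
def pvTravA (parent_indices : List Int) : Nat → Int → List Int → List Int
  | 0, _, joint_order => joint_order
  | fuel + 1, joint_idx, joint_order =>
    let joint_order := joint_order ++ [joint_idx]
    let children := ((PySem.List.enumerate parent_indices).filter (fun ip => ip.2 == joint_idx)).map (fun ip => ip.1)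
    children.foldl (fun acc child_idx => pvTravA parent_indices fuel child_idx acc) joint_order

def get_bvh_joint_order (parent_indices : List Int) : List Int :=
  pvTravA parent_indices (parent_indices.length + 1) 0 []

-- ===== PORT B =====
-- while j != 0 and 0 <= j < n and steps < n: j = parent_indices[j]; path.append(j)
-- (the remaining step budget 'n - steps' is the structural fuel)
def pvWalkB (parent_indices : List Int) : Nat → Int → List Int → Int × List Int
  | 0, j, path => (j, path)
  | rem + 1, j, path =>
    if j ≠ 0 ∧ 0 ≤ j ∧ j < (parent_indices.length : Int) then
      pvWalkB parent_indices rem (PySem.List.pyGetD parent_indices j 0)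
        (path ++ [PySem.List.pyGetD parent_indices j 0])
    else (j, path)

-- for i in range(n): … if j == 0: path.reverse(); keyed.append((path, i))
def pvKeyedB (parent_indices : List Int) : List (List Int × Int) :=
  (PySem.List.pyRange 0 (parent_indices.length : Int) 1).foldl
    (fun keyed i =>
      if (pvWalkB parent_indices parent_indices.length i [i]).1 = 0 then
        keyed ++ [((pvWalkB parent_indices parent_indices.length i [i]).2.reverse, i)]
      else keyed) []

-- keyed.sort(key=lambda e: e[0]); return [i for _, i in keyed]
def get_bvh_joint_order_alt (parent_indices : List Int) : List Int :=
  (PySem.List.sorted (pvKeyedB parent_indices) (fun e => e.1)).map (fun e => e.2)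

-- ===== PRECONDITION & SPEC =====
def pvChainStep (parent_indices : List Int) (x : Int) : Option Int :=
  if 0 ≤ x ∧ x < (parent_indices.length : Int) then some (PySem.List.pyGetD parent_indices x 0) else none

def pvChainFrom (parent_indices : List Int) (x : Int) : Nat → Option Int
  | 0 => some x
  | k + 1 => (pvChainFrom parent_indices x k).bind (pvChainStep parent_indices)

-- Pre_ excludes exactly the inputs whose parent-pointer chain from joint 0 returns to 0
-- (a cycle through the root): there Python A's recursive traverse never terminates
-- (RecursionError); on every other input A returns normally.
def Pre_get_bvh_joint_order (parent_indices : List Int) : Prop :=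
  ∀ k : Nat, k < parent_indices.length → pvChainFrom parent_indices 0 (k + 1) ≠ some 0

instance (parent_indices : List Int) : Decidable (Pre_get_bvh_joint_order parent_indices) := by
  unfold Pre_get_bvh_joint_order; infer_instance

def pvWitness_get_bvh_joint_order : List Int := [-1, 0, 0, 1]

-- On the empty list A returns [0], a joint index that does not exist; B returns the
-- empty order, which is the intended value for a skeleton with no joints.
def D_get_bvh_joint_order (parent_indices : List Int) : Prop := parent_indices.isEmpty = true

instance (parent_indices : List Int) : Decidable (D_get_bvh_joint_order parent_indices) := by
  unfold D_get_bvh_joint_order; infer_instance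

def Spec_get_bvh_joint_order (parent_indices : List Int) (out : List Int) : Prop :=
  ¬ D_get_bvh_joint_order parent_indices → out = get_bvh_joint_order_alt parent_indices
instance (parent_indices : List Int) (out : List Int) : Decidable (Spec_get_bvh_joint_order parent_indices out) := by
  unfold Spec_get_bvh_joint_order; infer_instance

def pvDiffWitness_get_bvh_joint_order : List Int := []
def pvDiffWitnessOut_get_bvh_joint_order : (List Int) × (List Int) := ([0], [])

-- ===== CLAIM (what is proved, stated in full; the proofs are below) =====
def Claim_unchanged_get_bvh_joint_order : Prop := ∀ (parent_indices : List Int), Dom_get_bvh_joint_order parent_indices → Pre_get_bvh_joint_order parent_indices → Spec_get_bvh_joint_order parent_indices (get_bvh_joint_order parent_indices)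
def Claim_changed_get_bvh_joint_order : Prop := Dom_get_bvh_joint_order (pvDiffWitness_get_bvh_joint_order) ∧ Pre_get_bvh_joint_order (pvDiffWitness_get_bvh_joint_order) ∧ D_get_bvh_joint_order (pvDiffWitness_get_bvh_joint_order) ∧ get_bvh_joint_order (pvDiffWitness_get_bvh_joint_order) = pvDiffWitnessOut_get_bvh_joint_order.1 ∧ get_bvh_joint_order_alt (pvDiffWitness_get_bvh_joint_order) = pvDiffWitnessOut_get_bvh_joint_order.2 ∧ pvDiffWitnessOut_get_bvh_joint_order.1 ≠ pvDiffWitnessOut_get_bvh_joint_order.2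
def Claim_exact_get_bvh_joint_order : Prop := ∀ (parent_indices : List Int), Dom_get_bvh_joint_order parent_indices → Pre_get_bvh_joint_order parent_indices → D_get_bvh_joint_order parent_indices → get_bvh_joint_order parent_indices ≠ get_bvh_joint_order_alt parent_indices


-- ===== LEMMAS AND PROOFS =====

-- the single parent step parent_indices[j] (used only under 0 ≤ j < len)
def pvStep (parent_indices : List Int) (j : Int) : Int := PySem.List.pyGetD parent_indices j 0

-- root path of j: pvPath f j = some [0, …, j] iff the parent chain from j reaches 0
-- within f in-range steps (all intermediate nodes nonzero)
def pvPath (parent_indices : List Int) : Nat → Int → Option (List Int)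
  | 0, j => if j = 0 then some [0] else none
  | f + 1, j =>
    if j = 0 then some [0]
    else if 0 ≤ j ∧ j < (parent_indices.length : Int) then
      (pvPath parent_indices f (pvStep parent_indices j)).map (· ++ [j])
    else none

def pvKey (parent_indices : List Int) (j : Int) : Option (List Int) :=
  pvPath parent_indices parent_indices.length j

def pvKeyD (parent_indices : List Int) (j : Int) : List Int := (pvKey parent_indices j).getD []

def pvKids (parent_indices : List Int) (i : Int) : List Int :=
  ((PySem.List.enumerate parent_indices).filter (fun ip => ip.2 == i)).map (fun ip => ip.1)

def pvSub (parent_indices : List Int) : Nat → Int → List Int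
  | 0, _ => []
  | f + 1, i => i :: (pvKids parent_indices i).flatMap (pvSub parent_indices f)

theorem pvTravA_eq_sub (pi : List Int) :
    ∀ (fuel : Nat) (i : Int) (acc : List Int),
      pvTravA pi fuel i acc = acc ++ pvSub pi fuel i := by
  intro fuel
  induction fuel with
  | zero => intro i acc; simp [pvTravA, pvSub]
  | succ f ih =>
    intro i acc
    have hfold : ∀ (cs : List Int) (a : List Int),
        cs.foldl (fun acc c => pvTravA pi f c acc) a = a ++ cs.flatMap (pvSub pi f) := by
      intro cs
      induction cs with
      | nil => intro a; simp
      | cons c cs' ihc =>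
        intro a
        rw [List.foldl_cons, ihc, ih]
        simp [List.flatMap_cons]
    simp only [pvTravA, pvSub, hfold, pvKids]
    simp

theorem pvPath_zero (pi : List Int) (f : Nat) : pvPath pi f 0 = some [0] := by
  cases f <;> simp [pvPath]

theorem pvPath_last {pi : List Int} {f : Nat} {j : Int} {P : List Int}
    (h : pvPath pi f j = some P) : ∃ Q, P = Q ++ [j] := by
  induction f generalizing j P with
  | zero =>
    by_cases hj : j = 0
    · subst hj; simp [pvPath] at h; exact ⟨[], by simp [← h]⟩
    · simp [pvPath, hj] at h
  | succ f ih =>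
    by_cases hj : j = 0
    · subst hj; simp [pvPath] at h; exact ⟨[], by simp [← h]⟩
    · simp only [pvPath, if_neg hj] at h
      split at h
      · cases ho : pvPath pi f (pvStep pi j) with
        | none => simp [ho] at h
        | some P' => simp [ho] at h; exact ⟨P', h.symm⟩
      · simp at h

theorem pvPath_head {pi : List Int} {f : Nat} {j : Int} {P : List Int}
    (h : pvPath pi f j = some P) : ∃ R, P = 0 :: R := by
  induction f generalizing j P with
  | zero =>
    by_cases hj : j = 0
    · subst hj; simp [pvPath] at h; exact ⟨[], by simp [← h]⟩
    · simp [pvPath, hj] at h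
  | succ f ih =>
    by_cases hj : j = 0
    · subst hj; simp [pvPath] at h; exact ⟨[], by simp [← h]⟩
    · simp only [pvPath, if_neg hj] at h
      split at h
      · cases ho : pvPath pi f (pvStep pi j) with
        | none => simp [ho] at h
        | some P' =>
          simp [ho] at h
          obtain ⟨R, rfl⟩ := ih ho
          exact ⟨R ++ [j], by simp [← h]⟩
      · simp at h

theorem pvPath_node_range {pi : List Int} {f : Nat} {j : Int} {P : List Int}
    (h : pvPath pi f j = some P) (hj : j ≠ 0) : 0 ≤ j ∧ j < (pi.length : Int) := by
  cases f with
  | zero => simp [pvPath, hj] at h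
  | succ f =>
    simp only [pvPath, if_neg hj] at h
    split at h
    · assumption
    · simp at h

theorem pvPath_mono {pi : List Int} {f f' : Nat} {j : Int} {P : List Int}
    (hf : f ≤ f') (h : pvPath pi f j = some P) : pvPath pi f' j = some P := by
  induction f generalizing f' j P with
  | zero =>
    by_cases hj : j = 0
    · subst hj; simp [pvPath] at h; rw [← h]; exact pvPath_zero pi f'
    · simp [pvPath, hj] at h
  | succ f ih =>
    by_cases hj : j = 0
    · subst hj; simp [pvPath] at h; rw [← h]; exact pvPath_zero pi f'
    · obtain ⟨f'', rfl⟩ : ∃ f'', f' = f'' + 1 := ⟨f' - 1, by omega⟩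
      simp only [pvPath, if_neg hj] at h ⊢
      split at h
      · rename_i hcond
        rw [if_pos hcond]
        cases ho : pvPath pi f (pvStep pi j) with
        | none => simp [ho] at h
        | some P' => rw [ih (by omega) ho]; simpa [ho] using h
      · simp at h

theorem pvPath_min {pi : List Int} {f : Nat} {j : Int} {P : List Int}
    (h : pvPath pi f j = some P) : pvPath pi (P.length - 1) j = some P := by
  induction f generalizing j P with
  | zero =>
    by_cases hj : j = 0
    · subst hj; simp [pvPath] at h; simp [← h, pvPath_zero]
    · simp [pvPath, hj] at h
  | succ f ih =>
    by_cases hj : j = 0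
    · subst hj; simp [pvPath] at h; simp [← h, pvPath_zero]
    · simp only [pvPath, if_neg hj] at h
      split at h
      · rename_i hcond
        cases ho : pvPath pi f (pvStep pi j) with
        | none => simp [ho] at h
        | some P' =>
          simp [ho] at h
          obtain ⟨R, rfl⟩ := pvPath_head ho
          have hmin := ih ho
          have hlen : P.length - 1 = ((0 :: R).length - 1) + 1 := by
            simp [← h]
          rw [hlen]
          simp only [pvPath, if_neg hj, if_pos hcond, hmin]
          simp [← h]
      · simp at h

theorem pvPath_range {pi : List Int} {f : Nat} {j : Int} {P : List Int}
    (h : pvPath pi f j = some P) : ∀ x ∈ P, 0 ≤ x ∧ x < (pi.length : Int) ∨ x = 0 := by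
  induction f generalizing j P with
  | zero =>
    by_cases hj : j = 0
    · subst hj; simp [pvPath] at h; simp [← h]
    · simp [pvPath, hj] at h
  | succ f ih =>
    by_cases hj : j = 0
    · subst hj; simp [pvPath] at h; simp [← h]
    · simp only [pvPath, if_neg hj] at h
      split at h
      · rename_i hcond
        cases ho : pvPath pi f (pvStep pi j) with
        | none => simp [ho] at h
        | some P' =>
          simp [ho] at h
          intro x hx
          rw [← h] at hx
          rcases List.mem_append.1 hx with hx' | hx'
          · exact ih ho x hx'
          · simp at hx'; subst hx'; exact Or.inl hcond
      · simp at h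

theorem pvChainFrom_add (pi : List Int) (x : Int) (a b : Nat) :
    pvChainFrom pi x (a + b) = (pvChainFrom pi x a).bind (fun y => pvChainFrom pi y b) := by
  induction b with
  | zero => simp [pvChainFrom]
  | succ b ih =>
    have : a + (b + 1) = (a + b) + 1 := by omega
    rw [this]
    show (pvChainFrom pi x (a + b)).bind (pvChainStep pi) = _
    rw [ih, Option.bind_assoc]
    rfl

theorem pvPath_chain {pi : List Int} {f : Nat} {j : Int} {P : List Int}
    (h : pvPath pi f j = some P) :
    ∀ t, t < P.length → pvChainFrom pi j t = some (P.getD (P.length - 1 - t) 0) := by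
  induction f generalizing j P with
  | zero =>
    by_cases hj : j = 0
    · subst hj; simp [pvPath] at h
      intro t ht
      rw [← h] at ht ⊢
      have ht0 : t = 0 := by simp at ht; omega
      subst ht0
      simp [pvChainFrom]
    · simp [pvPath, hj] at h
  | succ f ih =>
    by_cases hj : j = 0
    · subst hj; simp [pvPath] at h
      intro t ht
      rw [← h] at ht ⊢
      have ht0 : t = 0 := by simp at ht; omega
      subst ht0
      simp [pvChainFrom]
    · simp only [pvPath, if_neg hj] at h
      split at h
      · rename_i hcond
        cases ho : pvPath pi f (pvStep pi j) with
        | none => simp [ho] at h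
        | some P' =>
          simp [ho] at h
          intro t ht
          subst h
          cases t with
          | zero =>
            have h1 : (P' ++ [j]).length - 1 - 0 = P'.length := by simp
            rw [h1]
            simp only [pvChainFrom]
            rw [List.getD_eq_getElem (P' ++ [j]) 0 (by simp), List.getElem_concat_length]
            rfl
          | succ t =>
            have hstep1 : pvChainFrom pi j (t + 1) = pvChainFrom pi (pvStep pi j) t := by
              have he : t + 1 = 1 + t := by omega
              rw [he, pvChainFrom_add]
              have hstep : pvChainFrom pi j 1 = some (pvStep pi j) := by
                have h2 : pvChainFrom pi j 1 = pvChainStep pi j := by simp [pvChainFrom]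
                rw [h2, pvChainStep, if_pos hcond]
                rfl
              rw [hstep]
              rfl
            rw [hstep1]
            have htP' : t < P'.length := by simp at ht; omega
            rw [ih ho t htP']
            congr 1
            have e1 : (P' ++ [j]).length - 1 - (t + 1) = P'.length - 1 - t := by
              simp only [List.length_append, List.length_cons, List.length_nil]
              omega
            rw [e1]
            rw [List.getD_eq_getElem (P' ++ [j]) 0 (by simp only [List.length_append, List.length_cons, List.length_nil]; omega),
                List.getD_eq_getElem P' 0 (by omega)]
            exact (List.getElem_append_left (by omega)).symm
      · simp at h

theorem pvPath_pos_ne_zero {pi : List Int} {f : Nat} {j : Int} {P : List Int}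
    (h : pvPath pi f j = some P) : ∀ u, 0 < u → (hu : u < P.length) → P[u] ≠ 0 := by
  induction f generalizing j P with
  | zero =>
    by_cases hj : j = 0
    · subst hj; simp [pvPath] at h
      intro u hu hul
      rw [← h] at hul
      simp at hul
      omega
    · simp [pvPath, hj] at h
  | succ f ih =>
    by_cases hj : j = 0
    · subst hj; simp [pvPath] at h
      intro u hu hul
      rw [← h] at hul
      simp at hul
      omega
    · simp only [pvPath, if_neg hj] at h
      split at h
      · cases ho : pvPath pi f (pvStep pi j) with
        | none => simp [ho] at h
        | some P' =>
          simp [ho] at h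
          intro u hu hul
          subst h
          by_cases hu' : u < P'.length
          · rw [List.getElem_append_left hu']
            exact ih ho u hu hu'
          · have : u = P'.length := by simp at hul; omega
            subst this
            rw [List.getElem_append_right (by omega)]
            simpa using hj
      · simp at h

theorem pvPath_nodup {pi : List Int} {f : Nat} {j : Int} {P : List Int}
    (h : pvPath pi f j = some P) : P.Nodup := by
  obtain ⟨R, rfl⟩ := pvPath_head h
  rw [List.nodup_iff_getElem?_ne_getElem?]
  intro u v huv hv heq
  have hu : u < (0 :: R).length := lt_trans huv hv
  rw [List.getElem?_eq_getElem hu, List.getElem?_eq_getElem hv] at heq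
  have hval : (0 :: R)[u] = (0 :: R)[v] := by simpa using heq
  have hvR : v ≤ R.length := by simp at hv; omega
  by_cases hu0 : u = 0
  · subst hu0
    refine pvPath_pos_ne_zero h v (by omega) hv ?_
    rw [← hval]
    rfl
  · have ha := pvPath_chain h (R.length - v) (by simp only [List.length_cons]; omega)
    have hia : (0 :: R).length - 1 - (R.length - v) = v := by
      simp only [List.length_cons]; omega
    rw [hia, List.getD_eq_getElem _ 0 hv] at ha
    have hb := pvPath_chain h (R.length - u) (by simp only [List.length_cons]; omega)
    have hib : (0 :: R).length - 1 - (R.length - u) = u := by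
      simp only [List.length_cons]; omega
    rw [hib, List.getD_eq_getElem _ 0 hu] at hb
    have hzero := pvPath_chain h R.length (by simp)
    have hiz : (0 :: R).length - 1 - R.length = 0 := by
      simp only [List.length_cons]; omega
    rw [hiz] at hzero
    have hz0 : (0 :: R).getD 0 0 = 0 := rfl
    rw [hz0] at hzero
    have hshift : pvChainFrom pi j ((R.length - v) + u) = pvChainFrom pi j ((R.length - u) + u) := by
      rw [pvChainFrom_add, pvChainFrom_add, ha, hb, hval]
    have hru : R.length - u + u = R.length := by omega
    rw [hru, hzero] at hshift
    have hlt2 : (R.length - v) + u < (0 :: R).length := by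
      simp only [List.length_cons]; omega
    have hmid := pvPath_chain h ((R.length - v) + u) hlt2
    rw [hshift] at hmid
    have hmi : (0 :: R).length - 1 - ((R.length - v) + u) = v - u := by
      simp only [List.length_cons]; omega
    rw [hmi, List.getD_eq_getElem _ 0 (by simp only [List.length_cons]; omega)] at hmid
    refine pvPath_pos_ne_zero h (v - u) (by omega) (by simp only [List.length_cons]; omega) ?_
    injection hmid with hmid
    exact hmid.symm

theorem pvPath_len_le {pi : List Int} {f : Nat} {j : Int} {P : List Int}
    (hn : pi ≠ []) (h : pvPath pi f j = some P) : P.length ≤ pi.length := by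
  classical
  have hnd := pvPath_nodup h
  have hpos : 0 < pi.length := List.length_pos_iff.2 hn
  have hsub : P.toFinset ⊆ Finset.Ico (0 : ℤ) (pi.length : Int) := by
    intro x hx
    rw [List.mem_toFinset] at hx
    rcases pvPath_range h x hx with ⟨h0, h1⟩ | rfl
    · simp [Finset.mem_Ico]; exact ⟨h0, h1⟩
    · simp [Finset.mem_Ico]; exact_mod_cast hpos
  calc P.length = P.toFinset.card := (List.toFinset_card_of_nodup hnd).symm
    _ ≤ (Finset.Ico (0 : ℤ) (pi.length : Int)).card := Finset.card_le_card hsub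
    _ = pi.length := by rw [Int.card_Ico]; simp

theorem pvKey_child {pi : List Int} {i c : Int} {Pi : List Int} (hn : pi ≠ [])
    (hi : pvKey pi i = some Pi) (h0 : 0 ≤ c) (h1 : c < (pi.length : Int)) (hc : c ≠ 0)
    (hp : pvStep pi c = i) : pvKey pi c = some (Pi ++ [c]) := by
  have hlen1 : Pi.length ≤ pi.length := pvPath_len_le hn hi
  have hmin := pvPath_min hi
  have hmono : pvPath pi (pi.length - 1) i = some Pi := pvPath_mono (by omega) hmin
  obtain ⟨m, hm⟩ : ∃ m, pi.length = m + 1 := ⟨pi.length - 1, by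
    have : 0 < pi.length := List.length_pos_iff.2 hn
    omega⟩
  unfold pvKey
  rw [hm]
  simp only [pvPath, if_neg hc]
  rw [if_pos ⟨h0, h1⟩]
  have : pvPath pi m (pvStep pi c) = some Pi := by
    rw [hp]
    rw [← hmono]
    congr 1
    omega
  rw [this]
  rfl

theorem pvKey_parent {pi : List Int} {c : Int} {P : List Int}
    (h : pvKey pi c = some P) (hc : c ≠ 0) :
    ∃ P', P = P' ++ [c] ∧ pvKey pi (pvStep pi c) = some P' := by
  unfold pvKey at h ⊢
  cases hl : pi.length with
  | zero => rw [hl] at h; simp [pvPath, hc] at h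
  | succ m =>
    rw [hl] at h
    simp only [pvPath, if_neg hc] at h
    split at h
    · cases ho : pvPath pi m (pvStep pi c) with
      | none => simp [ho] at h
      | some P' =>
        simp [ho] at h
        exact ⟨P', h.symm, pvPath_mono (by omega) ho⟩
    · simp at h

theorem pvKey_desc {pi : List Int} {j : Int} {Pj : List Int}
    (h : pvKey pi j = some Pj) :
    ∀ Q, Q ≠ [] → Q <+: Pj → ∃ a, pvKey pi a = some Q := by
  have H : ∀ (L : Nat) (j : Int) (Pj : List Int), Pj.length = L →
      pvKey pi j = some Pj → ∀ Q, Q ≠ [] → Q <+: Pj → ∃ a, pvKey pi a = some Q := by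
    intro L
    induction L using Nat.strong_induction_on with
    | _ L IH =>
      intro j Pj hL hkey Q hQne hQpre
      by_cases heq : Q = Pj
      · exact ⟨j, heq ▸ hkey⟩
      · have hlt : Q.length < Pj.length := by
          have hle := hQpre.length_le
          rcases lt_or_eq_of_le hle with h | h
          · exact h
          · exact absurd (hQpre.eq_of_length h) heq
        have hj0 : j ≠ 0 := by
          rintro rfl
          have : pvKey pi 0 = some [0] := pvPath_zero pi pi.length
          rw [this] at hkey
          injection hkey with hkey
          rw [← hkey] at hlt hQpre
          have hQ0 : Q.length = 0 := by
            simp only [List.length_cons, List.length_nil] at hlt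
            omega
          rcases List.length_eq_zero_iff.1 hQ0 with rfl
          exact hQne rfl
        obtain ⟨P', hPeq, hkp⟩ := pvKey_parent hkey hj0
        have hQP' : Q <+: P' := by
          have h1 : Q <+: (P' ++ [j]).take P'.length := by
            rw [List.prefix_take_iff]
            refine ⟨hPeq ▸ hQpre, by rw [hPeq] at hlt; simp at hlt; omega⟩
          simpa [List.take_left'] using h1
        exact IH P'.length (by rw [← hL, hPeq]; simp) (pvStep pi j) P' rfl hkp Q hQne hQP'
  exact H Pj.length j Pj rfl h

theorem pvKey_extract_child {pi : List Int} {i j : Int} {Pi Pj : List Int}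
    (hi : pvKey pi i = some Pi) (hj : pvKey pi j = some Pj)
    (hpre : Pi <+: Pj) (hne : Pi ≠ Pj) :
    ∃ c r, Pj = Pi ++ c :: r ∧ pvKey pi c = some (Pi ++ [c]) ∧ pvStep pi c = i ∧
      c ≠ 0 ∧ 0 ≤ c ∧ c < (pi.length : Int) := by
  obtain ⟨t, rfl⟩ := hpre
  have ht : t ≠ [] := by rintro rfl; simp at hne
  obtain ⟨c, r, rfl⟩ : ∃ c r, t = c :: r := by
    cases t with
    | nil => exact absurd rfl ht
    | cons c r => exact ⟨c, r, rfl⟩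
  have hQpre : Pi ++ [c] <+: Pi ++ c :: r := by
    refine ⟨r, by simp⟩
  obtain ⟨a, ha⟩ := pvKey_desc hj (Pi ++ [c]) (by simp) hQpre
  have hac : a = c := by
    obtain ⟨Q', hQ'⟩ := pvPath_last ha
    have h1 : (Pi ++ [c]).getLast? = some c := List.getLast?_concat
    have h2 : (Pi ++ [c]).getLast? = some a := by rw [hQ']; exact List.getLast?_concat
    rw [h1] at h2
    injection h2 with h2
    exact h2.symm
  subst hac
  have hc0 : a ≠ 0 := by
    rintro rfl
    have h0 : pvKey pi 0 = some [0] := pvPath_zero pi pi.length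
    rw [h0] at ha
    injection ha with ha
    obtain ⟨Q4, hQ4⟩ := pvPath_last hi
    rw [hQ4] at ha
    have : Q4 ++ [i] ++ [(0:Int)] = [0] := ha.symm
    have hlen := congrArg List.length this
    simp at hlen
  obtain ⟨P', hP', hkp⟩ := pvKey_parent ha hc0
  have hPi : Pi = P' := by rwa [List.append_left_inj] at hP'
  rw [← hPi] at hkp
  have hstep : pvStep pi a = i := by
    obtain ⟨Q3, hQ3⟩ := pvPath_last hkp
    obtain ⟨Q4, hQ4⟩ := pvPath_last hi
    have h1 : Pi.getLast? = some (pvStep pi a) := by rw [hQ3]; exact List.getLast?_concat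
    have h2 : Pi.getLast? = some i := by rw [hQ4]; exact List.getLast?_concat
    exact Option.some.inj (h1.symm.trans h2)
  obtain ⟨hge, hltn⟩ := pvPath_node_range ha hc0
  exact ⟨a, r, rfl, ha, hstep, hc0, hge, hltn⟩

theorem pvMem_kids {pi : List Int} {i c : Int} :
    c ∈ pvKids pi i ↔ 0 ≤ c ∧ c < (pi.length : Int) ∧ pvStep pi c = i := by
  unfold pvKids
  simp only [List.mem_map, List.mem_filter, PySem.List.mem_enumerate_iff]
  constructor
  · rintro ⟨⟨idx, x⟩, ⟨⟨k, hk, hkx⟩, hbeq⟩, rfl⟩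
    rw [Prod.mk.injEq] at hkx
    obtain ⟨rfl, rfl⟩ := hkx
    simp only [beq_iff_eq] at hbeq
    refine ⟨by simp, by simp only [zero_add]; exact_mod_cast hk, ?_⟩
    simp only [zero_add]
    rw [pvStep, PySem.List.pyGetD_natCast, List.getD_eq_getElem _ _ hk]
    exact hbeq
  · rintro ⟨h0, h1, hstep⟩
    have hk : c.toNat < pi.length := by omega
    refine ⟨(c, pi[c.toNat]), ⟨⟨c.toNat, hk, ?_⟩, ?_⟩, rfl⟩
    · simp only [Prod.mk.injEq, zero_add]
      exact ⟨by omega, trivial⟩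
    · simp only [beq_iff_eq]
      rw [← hstep, pvStep, PySem.List.pyGetD_of_nonneg _ _ h0, List.getD_eq_getElem _ _ hk]

theorem pvKids_sorted (pi : List Int) (i : Int) : (pvKids pi i).Pairwise (· < ·) := by
  unfold pvKids
  rw [List.pairwise_map]
  exact (PySem.List.pairwise_lt_enumerate pi 0).filter _

theorem pvKids_ne_zero {pi : List Int} {i : Int} {Pi : List Int}
    (hpre : Pre_get_bvh_joint_order pi) (hn : pi ≠ []) (hi : pvKey pi i = some Pi) :
    (0 : Int) ∉ pvKids pi i := by
  intro hmem
  rcases pvMem_kids.1 hmem with ⟨_, h1, hstep⟩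
  have hn1 : 0 < pi.length := List.length_pos_iff.2 hn
  obtain ⟨R, hR⟩ := pvPath_head hi
  have hPlen : 1 ≤ Pi.length := by rw [hR]; simp
  have hPle : Pi.length ≤ pi.length := pvPath_len_le hn hi
  have hchain1 : pvChainFrom pi 0 1 = some i := by
    have h2 : pvChainFrom pi 0 1 = pvChainStep pi 0 := by simp [pvChainFrom]
    rw [h2, pvChainStep, if_pos ⟨le_refl (0 : Int), h1⟩]
    show some (pvStep pi 0) = some i
    rw [hstep]
  have hchain2 : pvChainFrom pi i (Pi.length - 1) = some 0 := by
    have := pvPath_chain hi (Pi.length - 1) (by omega)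
    rw [this]
    have hidx : Pi.length - 1 - (Pi.length - 1) = 0 := by omega
    rw [hidx, hR]
    simp
  have hfull : pvChainFrom pi 0 (1 + (Pi.length - 1)) = some 0 := by
    rw [pvChainFrom_add, hchain1]
    exact hchain2
  have : pvChainFrom pi 0 ((Pi.length - 1) + 1) = some 0 := by
    rw [show (Pi.length - 1) + 1 = 1 + (Pi.length - 1) by omega]
    exact hfull
  exact hpre (Pi.length - 1) (by omega) this

theorem pvLex_append_lt (P r : List Int) (hr : r ≠ []) : P < P ++ r := by
  show List.Lex (· < ·) P (P ++ r)
  induction P with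
  | nil =>
    cases r with
    | nil => exact absurd rfl hr
    | cons a t => exact List.Lex.nil
  | cons a t ih => exact List.Lex.cons ih

theorem pvLex_mid_lt (P : List Int) (c1 c2 : Int) (r1 r2 : List Int) (h : c1 < c2) :
    P ++ c1 :: r1 < P ++ c2 :: r2 := by
  show List.Lex (· < ·) _ _
  induction P with
  | nil => exact List.Lex.rel h
  | cons a t ih => exact List.Lex.cons ih

theorem pvPairwise_flatMap {α β : Type} {S : α → α → Prop} {R : β → β → Prop}
    (l : List α) (f : α → List β) :
    l.Pairwise S →
    (∀ a ∈ l, (f a).Pairwise R) →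
    (∀ a ∈ l, ∀ b ∈ l, S a b → ∀ x ∈ f a, ∀ y ∈ f b, R x y) →
    (l.flatMap f).Pairwise R := by
  induction l with
  | nil => intro _ _ _; simp
  | cons a l ih =>
    intro hl hin hcross
    rw [List.pairwise_cons] at hl
    rw [List.flatMap_cons, List.pairwise_append]
    refine ⟨hin a (by simp), ih hl.2 (fun b hb => hin b (by simp [hb]))
      (fun b hb b' hb' => hcross b (by simp [hb]) b' (by simp [hb'])), ?_⟩
    intro x hx y hy
    rw [List.mem_flatMap] at hy
    obtain ⟨b, hb, hyb⟩ := hy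
    exact hcross a (by simp) b (by simp [hb]) (hl.1 b hb) x hx y hyb

-- the central invariant: the subtree traversal below a reachable joint i visits exactly
-- the joints whose root path extends i's, in strictly lex-increasing path order
theorem pvMain {pi : List Int} (hpre : Pre_get_bvh_joint_order pi) (hn : pi ≠ []) :
    ∀ (fuel : Nat) (i : Int) (Pi : List Int), pvKey pi i = some Pi →
      pi.length + 1 - Pi.length ≤ fuel →
      (∀ j, j ∈ pvSub pi fuel i ↔ ∃ Pj, pvKey pi j = some Pj ∧ Pi <+: Pj)
      ∧ ((pvSub pi fuel i).map (pvKeyD pi)).Pairwise (· < ·) := by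
  intro fuel
  induction fuel with
  | zero =>
    intro i Pi hi hfuel
    have h1 : Pi.length ≤ pi.length := pvPath_len_le hn hi
    omega
  | succ f ih =>
    intro i Pi hi hfuel
    have hlast : ∃ Q, Pi = Q ++ [i] := pvPath_last hi
    have hchild : ∀ c ∈ pvKids pi i, pvKey pi c = some (Pi ++ [c]) := by
      intro c hc
      rcases pvMem_kids.1 hc with ⟨h0, h1, hp⟩
      have hc0 : c ≠ 0 := by rintro rfl; exact pvKids_ne_zero hpre hn hi hc
      exact pvKey_child hn hi h0 h1 hc0 hp
    have ihc : ∀ c ∈ pvKids pi i,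
        (∀ j, j ∈ pvSub pi f c ↔ ∃ Pj, pvKey pi j = some Pj ∧ (Pi ++ [c]) <+: Pj)
        ∧ ((pvSub pi f c).map (pvKeyD pi)).Pairwise (· < ·) :=
      fun c hc => ih c (Pi ++ [c]) (hchild c hc) (by simp; omega)
    constructor
    · intro j
      simp only [pvSub, List.mem_cons, List.mem_flatMap]
      constructor
      · rintro (rfl | ⟨c, hc, hj⟩)
        · exact ⟨Pi, hi, List.prefix_refl _⟩
        · rcases ((ihc c hc).1 j).1 hj with ⟨Pj, hPj, hpfx⟩
          exact ⟨Pj, hPj, (List.prefix_append Pi [c]).trans hpfx⟩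
      · rintro ⟨Pj, hPj, hpfx⟩
        by_cases heq : Pi = Pj
        · left
          subst heq
          obtain ⟨Q, hQ⟩ := hlast
          obtain ⟨Q', hQ'⟩ := pvPath_last hPj
          have h1 : Pi.getLast? = some i := by rw [hQ]; exact List.getLast?_concat
          have h2 : Pi.getLast? = some j := by rw [hQ']; exact List.getLast?_concat
          rw [h1] at h2
          injection h2 with h2
          exact h2.symm
        · right
          rcases pvKey_extract_child hi hPj hpfx heq with ⟨c, r, hPjeq, hkc, hsc, hc0, hcl, hcu⟩
          refine ⟨c, pvMem_kids.2 ⟨hcl, hcu, hsc⟩, ?_⟩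
          exact ((ihc c (pvMem_kids.2 ⟨hcl, hcu, hsc⟩)).1 j).2 ⟨Pj, hPj, by rw [hPjeq]; exact ⟨r, by simp⟩⟩
    · show ((pvSub pi (f + 1) i).map (pvKeyD pi)).Pairwise (· < ·)
      simp only [pvSub]
      rw [List.pairwise_map]
      rw [List.pairwise_cons]
      constructor
      · intro j hj
        rw [List.mem_flatMap] at hj
        obtain ⟨c, hc, hjc⟩ := hj
        rcases ((ihc c hc).1 j).1 hjc with ⟨Pj, hPj, hpfx⟩
        obtain ⟨s, hs⟩ := hpfx
        have hkeyDi : pvKeyD pi i = Pi := by simp [pvKeyD, hi]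
        have hkeyDj : pvKeyD pi j = Pj := by simp [pvKeyD, hPj]
        rw [hkeyDi, hkeyDj, ← hs]
        have : Pi ++ [c] ++ s = Pi ++ ([c] ++ s) := by simp
        rw [this]
        exact pvLex_append_lt Pi ([c] ++ s) (by simp)
      · refine pvPairwise_flatMap (pvKids pi i) (pvSub pi f) (pvKids_sorted pi i) ?_ ?_
        · intro c hc
          rw [← List.pairwise_map (f := pvKeyD pi)]
          exact (ihc c hc).2
        · intro c1 hc1 c2 hc2 hlt x hx y hy
          rcases ((ihc c1 hc1).1 x).1 hx with ⟨Px, hPx, hpx⟩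
          rcases ((ihc c2 hc2).1 y).1 hy with ⟨Py, hPy, hpy⟩
          obtain ⟨s1, hs1⟩ := hpx
          obtain ⟨s2, hs2⟩ := hpy
          have hkx : pvKeyD pi x = Px := by simp [pvKeyD, hPx]
          have hky : pvKeyD pi y = Py := by simp [pvKeyD, hPy]
          rw [hkx, hky, ← hs1, ← hs2]
          have e1 : Pi ++ [c1] ++ s1 = Pi ++ c1 :: s1 := by simp
          have e2 : Pi ++ [c2] ++ s2 = Pi ++ c2 :: s2 := by simp
          rw [e1, e2]
          exact pvLex_mid_lt Pi c1 c2 s1 s2 hlt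

theorem pvWalk_some {pi : List Int} :
    ∀ {rem : Nat} {j : Int} {P : List Int}, pvPath pi rem j = some P →
      ∀ path, pvWalkB pi rem j path = (0, path ++ P.dropLast.reverse) := by
  intro rem
  induction rem with
  | zero =>
    intro j P h path
    by_cases hj : j = 0
    · subst hj
      simp [pvPath] at h
      simp [pvWalkB, ← h]
    · simp [pvPath, hj] at h
  | succ rem ih =>
    intro j P h path
    by_cases hj : j = 0
    · subst hj
      simp [pvPath] at h
      simp [pvWalkB, ← h]
    · simp only [pvPath, if_neg hj] at h
      split at h
      · rename_i hcond
        cases ho : pvPath pi rem (pvStep pi j) with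
        | none => simp [ho] at h
        | some P' =>
          simp [ho] at h
          rw [pvWalkB, if_pos ⟨hj, hcond.1, hcond.2⟩]
          show pvWalkB pi rem (pvStep pi j) (path ++ [pvStep pi j]) = _
          rw [ih ho]
          obtain ⟨Q, hQ⟩ := pvPath_last ho
          subst h
          rw [List.dropLast_concat]
          rw [hQ]
          show (0, path ++ [pvStep pi j] ++ (Q ++ [pvStep pi j]).dropLast.reverse) = _
          rw [List.dropLast_concat, List.reverse_append]
          simp
      · simp at h

theorem pvWalk_none {pi : List Int} :
    ∀ {rem : Nat} {j : Int}, pvPath pi rem j = none →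
      ∀ path, (pvWalkB pi rem j path).1 ≠ 0 := by
  intro rem
  induction rem with
  | zero =>
    intro j h path
    by_cases hj : j = 0
    · subst hj; simp [pvPath] at h
    · simpa [pvWalkB] using hj
  | succ rem ih =>
    intro j h path
    by_cases hj : j = 0
    · subst hj; simp [pvPath] at h
    · simp only [pvPath, if_neg hj] at h
      by_cases hcond : 0 ≤ j ∧ j < (pi.length : Int)
      · rw [if_pos hcond] at h
        rw [pvWalkB, if_pos ⟨hj, hcond.1, hcond.2⟩]
        show (pvWalkB pi rem (pvStep pi j) (path ++ [pvStep pi j])).1 ≠ 0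
        cases ho : pvPath pi rem (pvStep pi j) with
        | none => exact ih ho _
        | some P' => simp [ho] at h
      · rw [pvWalkB, if_neg (by tauto)]
        simpa using hj

theorem pvKeyedB_eq (pi : List Int) :
    pvKeyedB pi = ((PySem.List.pyRange 0 (pi.length : Int) 1).filter
        (fun i => (pvKey pi i).isSome)).map (fun i => (pvKeyD pi i, i)) := by
  unfold pvKeyedB
  have hshape := PySem.List.foldl_append_if
    (fun i => decide ((pvWalkB pi pi.length i [i]).1 = 0))
    (fun i => ((pvWalkB pi pi.length i [i]).2.reverse, i))
    (PySem.List.pyRange 0 (pi.length : Int) 1) []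
  simp only [decide_eq_true_eq] at hshape
  rw [hshape]
  rw [List.nil_append]
  rw [List.filter_congr (q := fun i => (pvKey pi i).isSome)
    (by
      intro i _
      cases hk : pvKey pi i with
      | none =>
        simp only [hk, Option.isSome_none]
        exact decide_eq_false (pvWalk_none hk [i])
      | some P =>
        rw [pvWalk_some hk [i]]
        simp [hk])]
  apply List.map_congr_left
  intro i hi
  rw [List.mem_filter] at hi
  obtain ⟨P, hP⟩ := Option.isSome_iff_exists.1 (by simpa using hi.2)
  rw [pvWalk_some hP [i]]
  obtain ⟨Q, hQ⟩ := pvPath_last hP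
  have hkD : pvKeyD pi i = P := by simp [pvKeyD, hP]
  rw [hkD]
  subst hQ
  rw [List.dropLast_concat]
  simp

-- the port's sorted call elaborates with core's List LT instance; Mathlib's order lemmas
-- use the (propositionally equal) lexicographic LinearOrder instance — bridge the two
theorem pvSorted_inst {α κ : Type} (L1 L2 : LT κ)
    (D1 : @DecidableRel κ κ (@LT.lt κ L1)) (D2 : @DecidableRel κ κ (@LT.lt κ L2))
    (h : ∀ a b : κ, @LT.lt κ L1 a b ↔ @LT.lt κ L2 a b) (xs : List α) (key : α → κ) :
    @PySem.List.sorted α κ L1 D1 xs key false = @PySem.List.sorted α κ L2 D2 xs key false := by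
  rw [@PySem.List.sorted_eq_foldl_insertBy α κ L1 D1, @PySem.List.sorted_eq_foldl_insertBy α κ L2 D2]
  congr 1
  funext acc x
  congr 1
  funext a b
  exact decide_eq_decide.2 (h (key a) (key b))

-- ===== VERDICT (by name: the statements are the Claim_ definitions above) =====
theorem get_bvh_joint_order_spec : Claim_unchanged_get_bvh_joint_order := by
  intro pi _ hpre hnd
  have hn : pi ≠ [] := fun h => hnd (by rw [h]; rfl)
  have hn1 : 0 < pi.length := List.length_pos_iff.2 hn
  have hA : get_bvh_joint_order pi = pvSub pi (pi.length + 1) 0 := by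
    unfold get_bvh_joint_order
    rw [pvTravA_eq_sub]
    simp
  have hkey0 : pvKey pi 0 = some [0] := pvPath_zero pi _
  obtain ⟨hmem, hpair⟩ := pvMain hpre hn (pi.length + 1) 0 [0] hkey0 (by simp)
  have hmemL : ∀ j, j ∈ pvSub pi (pi.length + 1) 0 ↔ (pvKey pi j).isSome := by
    intro j
    rw [hmem j]
    constructor
    · rintro ⟨Pj, hPj, _⟩; simp [hPj]
    · intro hs
      obtain ⟨Pj, hPj⟩ := Option.isSome_iff_exists.1 hs
      obtain ⟨R, hR⟩ := pvPath_head hPj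
      exact ⟨Pj, hPj, by rw [hR]; exact ⟨R, rfl⟩⟩
  have hrange : ∀ j : Int, (pvKey pi j).isSome → j ∈ PySem.List.pyRange 0 (pi.length : Int) 1 := by
    intro j hs
    obtain ⟨Pj, hPj⟩ := Option.isSome_iff_exists.1 hs
    rw [PySem.List.mem_pyRange_one]
    by_cases hj : j = 0
    · subst hj; exact ⟨le_refl 0, by exact_mod_cast hn1⟩
    · exact pvPath_node_range hPj hj
  have hAKpair : ((pvSub pi (pi.length + 1) 0).map (fun j => (pvKeyD pi j, j))).Pairwise
      (fun a b => a.1 < b.1) := by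
    rw [List.pairwise_map]
    rw [List.pairwise_map] at hpair
    exact hpair
  have hAKnodup : ((pvSub pi (pi.length + 1) 0).map (fun j => (pvKeyD pi j, j))).Nodup :=
    hAKpair.imp (fun h => by intro e; rw [e] at h; exact lt_irrefl _ h)
  have hKBnodup : (((PySem.List.pyRange 0 (pi.length : Int) 1).filter
      (fun i => (pvKey pi i).isSome)).map (fun i => (pvKeyD pi i, i))).Nodup := by
    apply List.Nodup.map
    · intro a b h
      exact congrArg Prod.snd h
    · apply List.Nodup.filter
      rw [PySem.List.pyRange_zero_natCast]
      exact (List.nodup_range).map (fun a b h => by exact_mod_cast h)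
  have hperm : ((pvSub pi (pi.length + 1) 0).map (fun j => (pvKeyD pi j, j))).Perm
      (pvKeyedB pi) := by
    rw [pvKeyedB_eq]
    rw [List.perm_ext_iff_of_nodup hAKnodup hKBnodup]
    intro x
    simp only [List.mem_map, List.mem_filter]
    constructor
    · rintro ⟨j, hj, rfl⟩
      have hs := (hmemL j).1 hj
      exact ⟨j, ⟨hrange j hs, hs⟩, rfl⟩
    · rintro ⟨j, ⟨_, hs⟩, rfl⟩
      exact ⟨j, (hmemL j).2 hs, rfl⟩
  have hsorted := PySem.List.sorted_eq_of_perm_of_pairwise_lt (pvKeyedB pi)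
    ((pvSub pi (pi.length + 1) 0).map (fun j => (pvKeyD pi j, j))) (fun e => e.1) hperm hAKpair
  have hbridge := pvSorted_inst List.instLT List.instLinearOrder.toLT
    (fun a b => List.decidableLT a b) (@LinearOrder.toDecidableLT _ List.instLinearOrder)
    (fun a b => List.lt_iff_lex_lt a b) (pvKeyedB pi) (fun e => e.1)
  show get_bvh_joint_order pi = get_bvh_joint_order_alt pi
  rw [hA]
  unfold get_bvh_joint_order_alt
  rw [hbridge, hsorted, List.map_map]
  have hid : ((fun e : List Int × Int => e.2) ∘ (fun j : Int => (pvKeyD pi j, j))) = id := rfl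
  rw [hid, List.map_id]

theorem get_bvh_joint_order_changed : Claim_changed_get_bvh_joint_order := by
  unfold Claim_changed_get_bvh_joint_order; decide

theorem get_bvh_joint_order_tight : Claim_exact_get_bvh_joint_order := by
  intro pi _ _ hd
  unfold D_get_bvh_joint_order at hd
  rw [List.isEmpty_iff] at hd
  subst hd
  decide
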